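-- pv_equiv track=rewrite | github.com/AlperTheKing/Computations | binomialCoefficient.py | count_p_in_binomial
-- ===== SOURCE A (Python) =====
-- def count_p_in_binomial(N, P):
--     # Convert N to base P digits (least significant digit first)
--     N_digits = []
--     temp_N = N
--     while temp_N > 0:
--         N_digits.append(temp_N % P)
--         temp_N //= P
--
--     # Initialize DP table
--     from collections import defaultdict
--     dp = {0: 1}  # Key: exponent L, Value: count
--
--     # Process digits from most significant to least significant
--     for pos in reversed(range(len(N_digits))):
--         N_digit = N_digits[pos]
--         new_dp = defaultdict(int)
--         for L, count in dp.items():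
--             # For possible K_digit values from 0 to N_digit
--             for K_digit in range(N_digit + 1):
--                 N_minus_K_digit = N_digit - K_digit
--                 carry = 0
--                 if K_digit + N_minus_K_digit >= P:
--                     carry = 1
--                 new_L = L + carry
--                 new_dp[new_L] += count
--         dp = new_dp
--
--     # Build the result array
--     max_L = max(dp.keys())
--     result = [dp.get(L, 0) for L in range(max_L + 1)]
--     return result
-- ===== SOURCE B (Python) =====
-- def count_p_in_binomial(N, P):
--     # The carry in A's DP never occurs (each base-P digit d of N satisfies
--     # d < P), so the whole DP collapses to the product of (d + 1) over the
--     # base-P digits of N: a single base-conversion loop, no dict, no DP.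
--     product = 1
--     temp_N = N
--     while temp_N > 0:
--         product *= (temp_N % P) + 1
--         temp_N //= P
--     return [product]
-- ===== Notes on version B (the rewrite author's own statement) =====
-- stated objective: simpler
-- what changed: Replaces the digit-by-digit carry DP over a dict (an inner loop over range(digit+1) per digit, then a max/scan to build the result) with a single base-conversion loop returning [product of (digit+1)], since a carry can never occur: O(sum of digits) work drops to O(number of digits).
-- outside the precondition, e.g. on count_p_in_binomial(4, -2): A returns [0, 1], B returns [1]; on count_p_in_binomial(3, 0): A raises ZeroDivisionError, B raises ZeroDivisionError
import Mathlib
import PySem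

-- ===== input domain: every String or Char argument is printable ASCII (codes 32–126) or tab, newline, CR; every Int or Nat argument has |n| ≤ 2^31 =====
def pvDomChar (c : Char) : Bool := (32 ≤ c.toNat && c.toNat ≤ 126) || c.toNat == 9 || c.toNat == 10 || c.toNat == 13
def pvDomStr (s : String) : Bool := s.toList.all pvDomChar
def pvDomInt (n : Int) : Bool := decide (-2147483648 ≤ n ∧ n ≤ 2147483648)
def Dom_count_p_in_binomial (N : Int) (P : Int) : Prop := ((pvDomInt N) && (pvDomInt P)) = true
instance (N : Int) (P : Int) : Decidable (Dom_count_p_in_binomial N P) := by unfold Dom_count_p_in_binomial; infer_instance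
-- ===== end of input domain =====

-- B collapses A's carry DP to a single base-conversion loop returning the product of (digit+1): simpler, no dict.
-- Pre_ restricts N > 0 to bases P ≥ 2, the natural domain of base-P conversion (P = 0 raises, P = 1 diverges, P < 0 is degenerate).


-- ===== PORT A =====
-- while temp_N > 0: N_digits.append(temp_N % P); temp_N //= P   (fuel is only a totality guard;
-- under Pre_ the Python loop runs at most N.toNat times, so fuel N.toNat + 1 never runs out)
def cpbDigits : Nat → Int → Int → List Int
  | 0, _, _ => []
  | fuel + 1, t, P =>
    if t > 0 then PySem.Int.mod t P :: cpbDigits fuel (PySem.Int.floordiv t P) P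
    else []

-- one iteration of 'for pos in reversed(...)': build new_dp from dp and the digit N_digit
def cpbStep (P : Int) (dp : PySem.Dict Int Int) (N_digit : Int) : PySem.Dict Int Int :=
  dp.items.foldl (fun new_dp Lc =>
    (PySem.List.pyRange 0 (N_digit + 1) 1).foldl (fun new_dp K_digit =>
      let N_minus_K_digit := N_digit - K_digit
      let carry : Int := if K_digit + N_minus_K_digit ≥ P then 1 else 0
      let new_L := Lc.1 + carry
      new_dp.modify new_L 0 (· + Lc.2)) new_dp) PySem.Dict.empty

def count_p_in_binomial (N : Int) (P : Int) : List Int :=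
  let N_digits := cpbDigits (N.toNat + 1) N P
  let dp : PySem.Dict Int Int := PySem.Dict.ofList [(0, 1)]
  -- for pos in reversed(range(len(N_digits)))
  let dp := (PySem.List.pyRange ((N_digits.length : Int) - 1) (-1) (-1)).foldl
      (fun dp pos => cpbStep P dp (PySem.List.pyGetD N_digits pos 0)) dp
  match PySem.List.max? dp.keys (fun x => x) with
  | none => []   -- Python raises ValueError (max of empty sequence) here; excluded by Pre_
  | some max_L => (PySem.List.pyRange 0 (max_L + 1) 1).map (fun L => dp.getD L 0)

-- ===== PORT B =====
-- product = 1; while temp_N > 0: product *= (temp_N % P) + 1; temp_N //= P   (same fuel guard as A's loop)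
def cpbAltLoop : Nat → Int → Int → Int → Int
  | 0, _, _, product => product
  | fuel + 1, t, P, product =>
    if t > 0 then cpbAltLoop fuel (PySem.Int.floordiv t P) P (product * (PySem.Int.mod t P + 1))
    else product

def count_p_in_binomial_alt (N : Int) (P : Int) : List Int :=
  [cpbAltLoop (N.toNat + 1) N P 1]

-- ===== PRECONDITION & SPEC =====
-- Pre_ restricts positive N to bases P ≥ 2, the natural domain of base-P conversion: for N > 0,
-- P = 0 raises ZeroDivisionError, P = 1 never terminates, and P < 0 is outside the task's natural
-- domain (A's carry test against a negative base yields accidental values there, e.g. A (4, -2) = [0, 1]).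
def Pre_count_p_in_binomial (N : Int) (P : Int) : Prop := 0 < N → 2 ≤ P
instance (N : Int) (P : Int) : Decidable (Pre_count_p_in_binomial N P) := by unfold Pre_count_p_in_binomial; infer_instance
def pvWitness_count_p_in_binomial : Int × Int := (6, 2)

def Spec_count_p_in_binomial (N : Int) (P : Int) (out : List Int) : Prop := out = count_p_in_binomial_alt N P
instance (N : Int) (P : Int) (out : List Int) : Decidable (Spec_count_p_in_binomial N P out) := by unfold Spec_count_p_in_binomial; infer_instance

-- ===== CLAIM (what is proved, stated in full; the proofs are below) =====
def Claim_equal_count_p_in_binomial : Prop := ∀ (N : Int) (P : Int), Dom_count_p_in_binomial N P → Pre_count_p_in_binomial N P → Spec_count_p_in_binomial N P (count_p_in_binomial N P)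

-- ===== LEMMAS AND PROOFS =====


-- every base-P digit produced by A's conversion loop lies in [0, P) when P ≥ 2
theorem cpbDigits_bound (fuel : Nat) (t P : Int) (hP : 2 ≤ P) :
    ∀ d ∈ cpbDigits fuel t P, 0 ≤ d ∧ d < P := by
  induction fuel generalizing t with
  | zero => intro d hd; simp [cpbDigits] at hd
  | succ f ih =>
    intro d hd
    simp only [cpbDigits] at hd
    split at hd
    · rcases List.mem_cons.mp hd with h | h
      · subst h
        exact ⟨PySem.Int.mod_nonneg t (by omega), PySem.Int.mod_lt t (by omega)⟩
      · exact ih _ d h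
    · simp at hd

-- folding 'modify key 0 by (+ c)' over any list from a one-entry dict just accumulates
theorem inner_fold (c : Int) (l : List Int) (v : Int) :
    l.foldl (fun (nd : PySem.Dict Int Int) (_ : Int) => nd.modify 0 0 (· + c)) (PySem.Dict.mk [(0, v)])
      = PySem.Dict.mk [(0, v + l.length * c)] := by
  induction l generalizing v with
  | nil => simp
  | cons x tl ih =>
    simp only [List.foldl_cons]
    rw [show (PySem.Dict.mk [((0:Int), v)]).modify 0 0 (· + c) = PySem.Dict.mk [(0, v + c)] from rfl]
    rw [ih]
    congr 2
    simp [List.length_cons]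
    ring

-- one DP step on the single-entry dict {0: c}: carry is always 0, so it multiplies by (d + 1)
theorem cpbStep_single (P c d : Int) (hd0 : 0 ≤ d) (hdP : d < P) :
    cpbStep P (PySem.Dict.mk [(0, c)]) d = PySem.Dict.mk [(0, c * (d + 1))] := by
  unfold cpbStep
  rw [show (PySem.Dict.mk [((0:Int), c)]).items = [(0, c)] from rfl]
  simp only [List.foldl_cons, List.foldl_nil]
  rw [PySem.List.foldl_congr_mem _ _ (fun (nd : PySem.Dict Int Int) (_ : Int) => nd.modify 0 0 (· + c)) _
    (by
      intro nd K hK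
      have hc : ¬ P ≤ d := by omega
      simp [hc])]
  rw [PySem.List.pyRange_one_cons (by omega : (0:Int) < d + 1)]
  simp only [List.foldl_cons]
  rw [show (PySem.Dict.empty : PySem.Dict Int Int).modify 0 0 (· + c) = PySem.Dict.mk [(0, 0 + c)] from rfl]
  rw [inner_fold]
  have h2 : 0 + c + ((PySem.List.pyRange (0 + 1) (d + 1)).length : Int) * c = c * (d + 1) := by
    rw [PySem.List.length_pyRange_one]
    have h3 : ((d + 1 - (0 + 1)).toNat : Int) = d := by omega
    rw [h3]; ring
  rw [h2]

-- folding the DP step over a digit list keeps the dict a single entry {0: product of (d+1)}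
theorem cpbFold_prod (P : Int) :
    ∀ (ds : List Int), (∀ d ∈ ds, 0 ≤ d ∧ d < P) → ∀ (c : Int),
    ds.foldl (cpbStep P) (PySem.Dict.mk [(0, c)]) = PySem.Dict.mk [(0, c * ((ds.map (· + 1)).prod))] := by
  intro ds
  induction ds with
  | nil => intro _ c; simp
  | cons d tl ih =>
    intro hb c
    simp only [List.foldl_cons]
    rw [cpbStep_single P c d (hb d (List.mem_cons_self)).1 (hb d (List.mem_cons_self)).2]
    rw [ih (fun x hx => hb x (List.mem_cons_of_mem _ hx)) (c * (d + 1))]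
    congr 2
    simp [List.prod_cons]
    ring

-- 'for pos in reversed(range(len(ds)))' with ds[pos] IS a fold over ds in reverse
theorem pos_loop_eq (g : PySem.Dict Int Int → Int → PySem.Dict Int Int) :
    ∀ (ds : List Int) (dp : PySem.Dict Int Int),
    (PySem.List.pyRange ((ds.length : Int) - 1) (-1) (-1)).foldl
      (fun dp pos => g dp (PySem.List.pyGetD ds pos 0)) dp
    = ds.reverse.foldl g dp := by
  intro ds
  induction ds using List.reverseRecOn with
  | nil =>
    intro dp
    rw [PySem.List.pyRange_neg_one_eq_nil (by simp)]
    simp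
  | append_singleton xs x ih =>
    intro dp
    have hlen : ((xs ++ [x]).length : Int) - 1 = (xs.length : Int) := by
      simp [List.length_append]
    rw [hlen, PySem.List.pyRange_neg_one_cons (by omega : (-1:Int) < (xs.length : Int))]
    simp only [List.foldl_cons]
    have hx : PySem.List.pyGetD (xs ++ [x]) ((xs.length : Int)) 0 = x := by
      rw [PySem.List.pyGetD_eq_getElem _ _ (by omega)
        (by simp only [List.length_append, List.length_cons, List.length_nil]; omega)]
      simp
    rw [hx]
    rw [PySem.List.foldl_congr_mem _ _ (fun dp pos => g dp (PySem.List.pyGetD xs pos 0)) _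
      (by
        intro acc pos hpos
        rw [PySem.List.mem_pyRange_neg_one] at hpos
        have h0 : (0:Int) ≤ pos := by omega
        have h1 : pos < (xs.length : Int) := by omega
        show g acc (PySem.List.pyGetD (xs ++ [x]) pos 0) = g acc (PySem.List.pyGetD xs pos 0)
        rw [PySem.List.pyGetD_eq_getElem _ _ h0
            (by simp only [List.length_append, List.length_cons, List.length_nil]; omega),
            PySem.List.pyGetD_eq_getElem _ _ h0 (by omega)]
        rw [List.getElem_append_left])]
    rw [ih]
    simp [List.reverse_append]

theorem cpbAltLoop_eq (P : Int) :
    ∀ (fuel : Nat) (t p : Int),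
    cpbAltLoop fuel t P p = p * ((cpbDigits fuel t P).map (· + 1)).prod := by
  intro fuel
  induction fuel with
  | zero => intro t p; simp [cpbAltLoop, cpbDigits]
  | succ f ih =>
    intro t p
    simp only [cpbAltLoop, cpbDigits]
    split
    · rw [ih]
      simp [List.prod_cons]
      ring
    · simp


-- ===== VERDICT (by name: the statement is the Claim_ definition above) =====
theorem count_p_in_binomial_spec : Claim_equal_count_p_in_binomial := by
  intro N P hDom hPre
  unfold Spec_count_p_in_binomial count_p_in_binomial count_p_in_binomial_alt
  have hb : ∀ d ∈ cpbDigits (N.toNat + 1) N P, 0 ≤ d ∧ d < P := by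
    by_cases hN : 0 < N
    · exact cpbDigits_bound _ _ _ (hPre hN)
    · have hnil : cpbDigits (N.toNat + 1) N P = [] := by
        simp [cpbDigits, hN]
      rw [hnil]; intro d hd; simp at hd
  simp only []
  rw [pos_loop_eq]
  rw [show (PySem.Dict.ofList [((0:Int), (1:Int))]) = PySem.Dict.mk [(0, 1)] from rfl]
  rw [cpbFold_prod P _ (fun d hd => hb d (List.mem_reverse.mp hd)) 1]
  rw [cpbAltLoop_eq]
  set v : Int := 1 * (((cpbDigits (N.toNat + 1) N P).reverse.map (· + 1)).prod) with hv
  rw [show (PySem.Dict.mk [((0:Int), v)]).keys = [0] from rfl]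
  rw [show PySem.List.max? [(0:Int)] (fun x => x) = some 0 from rfl]
  simp only []
  rw [PySem.List.pyRange_one_singleton 0]
  simp only [List.map_cons, List.map_nil]
  rw [show (PySem.Dict.mk [((0:Int), v)]).getD 0 0 = v from rfl]
  rw [hv]
  simp [List.map_reverse, List.prod_reverse]
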